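-- pv_equiv track=rewrite | github.com/Mark-Seaman/SeamanTech | bin/util/tabs.py | group_tabs
-- ===== SOURCE A (Python) =====
-- def group_tabs(text):
--     results = []
--     groups = text.split('**')
--     for i,g in enumerate(groups):
--         if i%2>0:
--             if i+1<len(groups):
--                 results.append(groups[i]+groups[i+1])
--             else:
--                 results.append(groups[i])
--     return results
-- ===== SOURCE B (Python) =====
-- def group_tabs(text):
--     groups = text.split('**')
--     odds = groups[1::2]
--     evens = groups[2::2]
--     evens = evens + [''] * (len(odds) - len(evens))
--     return [o + e for o, e in zip(odds, evens)]
-- ===== Notes on version B (the rewrite author's own statement) =====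
-- stated objective: idiomatic
-- what changed: Replaced the single enumerate loop with odd-index test and lookahead indexing by staged whole-list passes: take the strided slices groups[1::2] and groups[2::2], pad the even slice with empty strings to the odds' length, and zip-concatenate the two slices elementwise.
import Mathlib
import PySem

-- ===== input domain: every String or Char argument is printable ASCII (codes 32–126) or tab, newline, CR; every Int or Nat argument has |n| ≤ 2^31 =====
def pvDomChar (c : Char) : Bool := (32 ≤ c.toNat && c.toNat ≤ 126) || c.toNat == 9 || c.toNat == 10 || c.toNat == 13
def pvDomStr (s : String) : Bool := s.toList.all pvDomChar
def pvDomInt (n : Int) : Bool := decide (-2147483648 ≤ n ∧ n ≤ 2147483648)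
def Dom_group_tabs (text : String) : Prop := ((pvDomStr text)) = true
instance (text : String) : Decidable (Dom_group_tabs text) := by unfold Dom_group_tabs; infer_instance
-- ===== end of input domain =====

-- B replaces the enumerate/odd-index/lookahead loop by staged whole-list passes: the strided
-- slices groups[1::2] and groups[2::2], the even slice padded with empty strings to the odds' length,
-- then an elementwise zip-concatenation (idiomatic; same cost).

-- ===== PORT A =====
def group_tabs (text : String) : List String :=
  let groups := (PySem.Str.split? text "**").getD []
  (PySem.List.enumerate groups).foldl
    (fun results p =>
      if PySem.Int.mod p.1 2 > 0 then
        if p.1 + 1 < (groups.length : Int) then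
          -- groups[i], groups[i+1]: i from enumerate, always in range, so Python never raises here
          results ++ [PySem.List.pyGetD groups p.1 "" ++ PySem.List.pyGetD groups (p.1 + 1) ""]
        else
          results ++ [PySem.List.pyGetD groups p.1 ""]
      else results) []

-- ===== PORT B =====
def group_tabs_alt (text : String) : List String :=
  let groups := (PySem.Str.split? text "**").getD []
  let odds := (PySem.List.slice? groups (some 1) none 2).getD []
  let evens := (PySem.List.slice? groups (some 2) none 2).getD []
  -- "[''] * (len(odds) - len(evens))": a nonpositive multiplier gives [] in Python, as .toNat does here
  let evens := evens ++ List.replicate (PySem.List.len odds - PySem.List.len evens).toNat ""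
  (odds.zip evens).map (fun p => p.1 ++ p.2)

-- ===== PRECONDITION & SPEC =====
def Spec_group_tabs (text : String) (out : List String) : Prop := out = group_tabs_alt text
instance (text : String) (out : List String) : Decidable (Spec_group_tabs text out) := by unfold Spec_group_tabs; infer_instance

-- ===== CLAIM (what is proved, stated in full; the proofs are below) =====
def Claim_equal_group_tabs : Prop := ∀ (text : String), Dom_group_tabs text → Spec_group_tabs text (group_tabs text)

-- ===== LEMMAS AND PROOFS =====

-- every second element of a list, starting at its head
def pvStride2 {α : Type} : List α → List α
  | [] => []
  | [x] => [x]
  | x :: _ :: t => x :: pvStride2 t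

-- the contribution of loop index j to A's result, as a function of the index alone
def pvG (gs : List String) (i : Int) : List String :=
  if PySem.Int.mod i 2 > 0 then
    [if i + 1 < (gs.length : Int) then
        PySem.List.pyGetD gs i "" ++ PySem.List.pyGetD gs (i + 1) ""
      else PySem.List.pyGetD gs i ""]
  else []

-- A's result re-expressed over Nat indices
def pvRangeF (gs : List String) : List String :=
  (List.range gs.length).flatMap (fun j =>
    if j % 2 = 1 then
      [if j + 1 < gs.length then gs.getD j "" ++ gs.getD (j + 1) "" else gs.getD j ""]
    else [])

-- the common two-at-a-time pairing both programs compute on the tail of the split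
def pvPairCat : List String → List String
  | [] => []
  | [o] => [o ++ ""]
  | o :: e :: t => (o ++ e) :: pvPairCat t

lemma pvG_natCast (gs : List String) (j : Nat) :
    pvG gs (j : Int) =
      if j % 2 = 1 then
        [if j + 1 < gs.length then gs.getD j "" ++ gs.getD (j + 1) "" else gs.getD j ""]
      else [] := by
  have hmod : (PySem.Int.mod (j : Int) 2 > 0) ↔ j % 2 = 1 := by
    simp only [PySem.Int.mod]
    rw [Int.fmod_eq_emod]
    simp
    omega
  have hlt : ((j : Int) + 1 < (gs.length : Int)) ↔ j + 1 < gs.length := by omega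
  have hget1 : PySem.List.pyGetD gs ((j : Int) + 1) "" = gs.getD (j + 1) "" := by
    have : ((j : Int) + 1) = ((j + 1 : Nat) : Int) := by omega
    rw [this, PySem.List.pyGetD_natCast]
  simp only [pvG, PySem.List.pyGetD_natCast, hget1]
  by_cases h : j % 2 = 1
  · simp only [if_pos (hmod.mpr h), if_pos h]
    by_cases h2 : j + 1 < gs.length
    · rw [if_pos (hlt.mpr h2), if_pos h2]
    · rw [if_neg (fun hc => h2 (hlt.mp hc)), if_neg h2]
  · rw [if_neg (fun hc => h (hmod.mp hc)), if_neg h]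

lemma pvFold_eq_rangeF (gs : List String) :
    (PySem.List.enumerate gs).foldl
      (fun results p =>
        if PySem.Int.mod p.1 2 > 0 then
          if p.1 + 1 < (gs.length : Int) then
            results ++ [PySem.List.pyGetD gs p.1 "" ++ PySem.List.pyGetD gs (p.1 + 1) ""]
          else
            results ++ [PySem.List.pyGetD gs p.1 ""]
        else results) []
    = pvRangeF gs := by
  have hbody : (fun (results : List String) (p : Int × String) =>
        if PySem.Int.mod p.1 2 > 0 then
          if p.1 + 1 < (gs.length : Int) then
            results ++ [PySem.List.pyGetD gs p.1 "" ++ PySem.List.pyGetD gs (p.1 + 1) ""]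
          else
            results ++ [PySem.List.pyGetD gs p.1 ""]
        else results)
      = fun results p => results ++ pvG gs p.1 := by
    funext results p
    simp only [pvG]
    split_ifs <;> simp
  rw [hbody, PySem.List.foldl_append_eq_flatMap, List.nil_append,
      PySem.List.enumerate_eq_map_pyRange gs "", List.flatMap_map]
  have hlen : PySem.List.len gs = (gs.length : Int) := by simp [PySem.List.len]
  rw [hlen, PySem.List.pyRange_zero_natCast, List.flatMap_map]
  unfold pvRangeF
  exact List.flatMap_congr (fun j _ => pvG_natCast gs j)

lemma pvRangeF_cons (t : List String) : ∀ x, pvRangeF (x :: t) = pvPairCat t := by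
  induction t using pvPairCat.induct with
  | case1 => intro x; simp [pvRangeF, pvPairCat]
  | case2 o => intro x; simp [pvRangeF, pvPairCat, List.range_succ]
  | case3 o e t ih =>
    intro x
    have hlen : (x :: o :: e :: t).length = 2 + (t.length + 1) := by simp; omega
    unfold pvRangeF
    rw [hlen, List.range_add, List.flatMap_append, List.flatMap_map]
    have h0 : List.range 2 = [0, 1] := by decide
    rw [h0]
    have hfirst : ([0, 1] : List Nat).flatMap (fun j =>
        if j % 2 = 1 then
          [if j + 1 < 2 + (t.length + 1) then
              (x :: o :: e :: t).getD j "" ++ (x :: o :: e :: t).getD (j + 1) ""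
            else (x :: o :: e :: t).getD j ""]
        else []) = [o ++ e] := by
      simp [List.flatMap]
    rw [hfirst]
    have hrest : (List.range (t.length + 1)).flatMap (fun j =>
        if (2 + j) % 2 = 1 then
          [if 2 + j + 1 < 2 + (t.length + 1) then
              (x :: o :: e :: t).getD (2 + j) "" ++ (x :: o :: e :: t).getD (2 + j + 1) ""
            else (x :: o :: e :: t).getD (2 + j) ""]
        else []) = pvRangeF (e :: t) := by
      unfold pvRangeF
      refine List.flatMap_congr (fun j _ => ?_)
      have hm : (2 + j) % 2 = j % 2 := by omega
      have hidx : (x :: o :: e :: t).getD (2 + j) "" = (e :: t).getD j "" := by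
        have : 2 + j = j + 1 + 1 := by omega
        rw [this, List.getD_cons_succ, List.getD_cons_succ]
      have hidx1 : (x :: o :: e :: t).getD (2 + j + 1) "" = (e :: t).getD (j + 1) "" := by
        have : 2 + j + 1 = j + 1 + 1 + 1 := by omega
        rw [this, List.getD_cons_succ, List.getD_cons_succ]
      have hc : (2 + j + 1 < 2 + (t.length + 1)) ↔ (j + 1 < (e :: t).length) := by
        simp; omega
      rw [hm, hidx, hidx1]
      by_cases h : j % 2 = 1
      · rw [if_pos h, if_pos h]
        by_cases h2 : j + 1 < (e :: t).length
        · rw [if_pos (hc.mpr h2), if_pos h2]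
        · rw [if_neg (fun hx => h2 (hc.mp hx)), if_neg h2]
      · rw [if_neg h, if_neg h]
    rw [hrest, ih e, pvPairCat]
    simp

-- every-second-element as the filterMap slice? computes for a nonnegative in-range start
lemma pvStride2_filterMap {α : Type} (ys : List α) :
    List.filterMap (fun k : Nat => ys[2 * k]?) (List.range ((ys.length + 1) / 2))
      = pvStride2 ys := by
  induction ys using pvStride2.induct with
  | case1 => simp [pvStride2]
  | case2 x => simp [pvStride2]
  | case3 x y t ih =>
    have hc : ((x :: y :: t).length + 1) / 2 = (t.length + 1) / 2 + 1 := by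
      simp; omega
    rw [hc, List.range_succ_eq_map, List.filterMap_cons, List.filterMap_map]
    have h0 : (x :: y :: t)[2 * 0]? = some x := by simp
    rw [h0]
    have hf : ((fun k : Nat => (x :: y :: t)[2 * k]?) ∘ fun k => k + 1)
        = fun k : Nat => t[2 * k]? := by
      funext k
      have : 2 * (k + 1) = 2 * k + 1 + 1 := by omega
      simp [Function.comp, this]
    rw [hf, ih, pvStride2]

-- groups[a::2] is every second element of (drop a groups)
lemma pvStride2_cons {α : Type} (x : α) (xs : List α) :
    pvStride2 (x :: xs) = x :: pvStride2 (xs.drop 1) := by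
  cases xs <;> simp [pvStride2]

-- groups[a::2] is every second element of (drop a groups)
lemma pvSlice?_step2 {α : Type} (xs : List α) (a : Nat) :
    PySem.List.slice? xs (some (a : Int)) none 2 = some (pvStride2 (xs.drop a)) := by
  simp only [PySem.List.slice?, PySem.List.sliceIndices]
  norm_num
  have h0 : ¬((a : Int) < 0) := by omega
  simp only [if_neg h0]
  by_cases h : a ≤ xs.length
  · have hmin : min (a : Int) (xs.length : Int) = (a : Int) := by omega
    simp only [hmin]
    by_cases hlt : (a : Int) < (xs.length : Int)
    · rw [if_pos hlt]
      have hcnt : (((xs.length : Int) - a + 2 - 1) / 2).toNat = ((xs.drop a).length + 1) / 2 := by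
        simp only [List.length_drop]
        omega
      rw [hcnt]
      have hidx : (fun k : Nat => xs[((a : Int) + 2 * (k : Int)).toNat]?)
          = fun k : Nat => (xs.drop a)[2 * k]? := by
        funext k
        have h1 : ((a : Int) + 2 * (k : Int)).toNat = a + 2 * k := by omega
        rw [h1, List.getElem?_drop]
      rw [hidx, pvStride2_filterMap]
    · rw [if_neg hlt]
      have ha : a = xs.length := by omega
      subst ha
      simp [pvStride2]
  · have hmin : min (a : Int) (xs.length : Int) = (xs.length : Int) := by omega
    simp only [hmin]
    rw [if_neg (by omega : ¬ ((xs.length : Int) < (xs.length : Int)))]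
    have hd : xs.drop a = [] := List.drop_eq_nil_of_le (by omega)
    simp [hd, pvStride2]

-- B's zip-with-padding over the two strides is the two-at-a-time pairing
lemma pvZip_eq_pairCat (t : List String) :
    ((pvStride2 t).zip
        (pvStride2 (t.drop 1) ++
          List.replicate
            (PySem.List.len (pvStride2 t) - PySem.List.len (pvStride2 (t.drop 1))).toNat
            "")).map (fun p => p.1 ++ p.2)
      = pvPairCat t := by
  induction t using pvPairCat.induct with
  | case1 => simp [pvStride2, pvPairCat]
  | case2 o => simp [pvStride2, pvPairCat, PySem.List.len]
  | case3 o e t ih =>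
    have hlen : ∀ (xs : List String) (x : String),
        PySem.List.len (x :: xs) = PySem.List.len xs + 1 := by
      intro xs x; simp [PySem.List.len]
    simp only [pvStride2_cons, List.drop_succ_cons, List.drop_zero, hlen]
    have hsub : PySem.List.len (pvStride2 t) + 1 - (PySem.List.len (pvStride2 (t.drop 1)) + 1)
        = PySem.List.len (pvStride2 t) - PySem.List.len (pvStride2 (t.drop 1)) := by omega
    rw [hsub, List.cons_append, List.zip_cons_cons, List.map_cons, ih]
    rfl

-- ===== VERDICT (by name: the statement is the Claim_ definition above) =====
theorem group_tabs_spec : Claim_equal_group_tabs := by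
  intro text _
  unfold Spec_group_tabs group_tabs group_tabs_alt
  rw [pvFold_eq_rangeF]
  cases h : (PySem.Str.split? text "**").getD [] with
  | nil =>
    have h1 : PySem.List.slice? ([] : List String) (some 1) none 2 = some [] := by
      exact_mod_cast pvSlice?_step2 ([] : List String) 1
    have h2 : PySem.List.slice? ([] : List String) (some 2) none 2 = some [] := by
      exact_mod_cast pvSlice?_step2 ([] : List String) 2
    simp [pvRangeF, h1, h2]
  | cons x t =>
    rw [pvRangeF_cons t x]
    have h1 : PySem.List.slice? (x :: t) (some 1) none 2 = some (pvStride2 t) := by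
      exact_mod_cast pvSlice?_step2 (x :: t) 1
    have h2 : PySem.List.slice? (x :: t) (some 2) none 2 = some (pvStride2 (t.drop 1)) := by
      exact_mod_cast pvSlice?_step2 (x :: t) 2
    simp only [h1, h2, Option.getD_some]
    exact (pvZip_eq_pairCat t).symm
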